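-- pv_equiv track=rewrite | github.com/qyuan2/TAGAPT_generated_samples | graph_instance.py | find_target_rule
-- ===== SOURCE A (Python) =====
-- def find_target_rule(last_rule,match_rule):
--     greater_numbers = [num for num in match_rule if num >= last_rule]
--     smaller_numbers = [num for num in match_rule if num <= last_rule]
--
--     if greater_numbers:
--         nearest_greater = min(greater_numbers)
--         return nearest_greater
--     elif smaller_numbers:
--         nearest_smaller = max(smaller_numbers)
--         return nearest_smaller
--     else:
--         return None
-- ===== SOURCE B (Python) =====
-- def find_target_rule(last_rule, match_rule):
--     best_ge = None  # smallest element >= last_rule seen so far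
--     best_le = None  # largest element <= last_rule seen so far
--     for num in match_rule:
--         if num >= last_rule:
--             if best_ge is None or num < best_ge:
--                 best_ge = num
--         else:
--             if best_le is None or num > best_le:
--                 best_le = num
--     if best_ge is not None:
--         return best_ge
--     return best_le
-- ===== Notes on version B (the rewrite author's own statement) =====
-- stated objective: simpler
-- what changed: Replaced building two filtered lists and calling min/max on them by a single left-to-right pass that keeps the best candidate on each side (smallest >= target, largest < target) and picks the >= side if present; no intermediate lists are allocated.
import Mathlib
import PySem

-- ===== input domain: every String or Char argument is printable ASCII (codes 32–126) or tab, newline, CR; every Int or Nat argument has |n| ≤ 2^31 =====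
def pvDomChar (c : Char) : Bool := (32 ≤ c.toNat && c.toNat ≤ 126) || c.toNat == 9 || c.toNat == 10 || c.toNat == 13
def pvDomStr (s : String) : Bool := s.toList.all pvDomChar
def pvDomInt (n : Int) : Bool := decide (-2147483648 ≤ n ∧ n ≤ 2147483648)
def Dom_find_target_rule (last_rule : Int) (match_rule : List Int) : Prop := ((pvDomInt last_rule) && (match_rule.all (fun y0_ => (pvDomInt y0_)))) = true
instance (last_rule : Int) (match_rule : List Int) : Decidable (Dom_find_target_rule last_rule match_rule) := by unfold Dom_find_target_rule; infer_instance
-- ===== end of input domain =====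

-- B replaces the two filtered lists plus min/max by one left-to-right pass keeping the
-- best candidate on each side (objective: simpler single pass, no intermediate lists).

-- ===== PORT A =====
def find_target_rule (last_rule : Int) (match_rule : List Int) : Option Int :=
  let greater_numbers := match_rule.filter (fun num => decide (last_rule ≤ num))
  let smaller_numbers := match_rule.filter (fun num => decide (num ≤ last_rule))
  if greater_numbers.isEmpty = false then
    PySem.List.min? greater_numbers (fun x => x)
  else if smaller_numbers.isEmpty = false then
    PySem.List.max? smaller_numbers (fun x => x)
  else
    none

-- ===== PORT B =====
def altStep (last_rule : Int) (acc : Option Int × Option Int) (num : Int) : Option Int × Option Int :=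
  if last_rule ≤ num then
    match acc.1 with
    | none => (some num, acc.2)
    | some m => if num < m then (some num, acc.2) else acc
  else
    match acc.2 with
    | none => (acc.1, some num)
    | some m => if m < num then (acc.1, some num) else acc

def find_target_rule_alt (last_rule : Int) (match_rule : List Int) : Option Int :=
  let r := match_rule.foldl (altStep last_rule) (none, none)
  match r.1 with
  | some v => some v
  | none => r.2

-- ===== PRECONDITION & SPEC =====
def Spec_find_target_rule (last_rule : Int) (match_rule : List Int) (out : Option Int) : Prop := out = find_target_rule_alt last_rule match_rule
instance (last_rule : Int) (match_rule : List Int) (out : Option Int) : Decidable (Spec_find_target_rule last_rule match_rule out) := by unfold Spec_find_target_rule; infer_instance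

-- ===== CLAIM (what is proved, stated in full; the proofs are below) =====
def Claim_equal_find_target_rule : Prop := ∀ (last_rule : Int) (match_rule : List Int), Dom_find_target_rule last_rule match_rule → Spec_find_target_rule last_rule match_rule (find_target_rule last_rule match_rule)

-- ===== LEMMAS AND PROOFS =====

-- combine an accumulator option with an option by min / max
def omin : Option Int → Option Int → Option Int
  | none, y => y
  | some a, none => some a
  | some a, some b => some (min a b)

def omax : Option Int → Option Int → Option Int
  | none, y => y
  | some a, none => some a
  | some a, some b => some (max a b)

-- reference value of the fold's components
def mge (t : Int) (xs : List Int) : Option Int :=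
  match xs.filter (fun n => decide (t ≤ n)) with
  | [] => none
  | h :: tl => some (tl.foldl min h)

def mlt (t : Int) (xs : List Int) : Option Int :=
  match xs.filter (fun n => decide (n < t)) with
  | [] => none
  | h :: tl => some (tl.foldl max h)

lemma fmin (a b : Int) (l : List Int) : List.foldl min (min a b) l = min a (List.foldl min b l) :=
  List.foldl_assoc

lemma fmax (a b : Int) (l : List Int) : List.foldl max (max a b) l = max a (List.foldl max b l) :=
  List.foldl_assoc

lemma altStep_fold (t : Int) (xs : List Int) :
    ∀ bg bl, xs.foldl (altStep t) (bg, bl) = (omin bg (mge t xs), omax bl (mlt t xs)) := by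
  induction xs with
  | nil => intro bg bl; simp [mge, mlt, omin, omax]; cases bg <;> cases bl <;> simp [omin, omax]
  | cons x xs ih =>
    intro bg bl
    by_cases hx : t ≤ x
    · have hlt : ¬ x < t := by omega
      simp only [List.foldl_cons, altStep, if_pos hx]
      cases bg with
      | none =>
        rw [ih (some x) bl]
        simp [mge, mlt, hx, hlt]
        cases h : List.filter (fun n => decide (t ≤ n)) xs with
        | nil => simp [omin]
        | cons h' tl =>
          simp [omin]
          rw [List.foldl_assoc (op := min)]
      | some m =>
        by_cases hxm : x < m
        · dsimp only []
          rw [if_pos hxm, ih (some x) bl]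
          simp [mge, mlt, hx, hlt]
          cases h : List.filter (fun n => decide (t ≤ n)) xs with
          | nil => simp [omin]; omega
          | cons h' tl =>
            simp [omin, fmin]
            generalize List.foldl min h' tl = F
            omega
        · dsimp only []
          rw [if_neg hxm, ih (some m) bl]
          simp [mge, mlt, hx, hlt]
          cases h : List.filter (fun n => decide (t ≤ n)) xs with
          | nil => simp [omin]; omega
          | cons h' tl =>
            simp [omin, fmin]
            generalize List.foldl min h' tl = F
            omega
    · have hlt : x < t := by omega
      simp only [List.foldl_cons, altStep, if_neg hx]
      cases bl with
      | none =>
        rw [ih bg (some x)]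
        simp [mge, mlt, hx, hlt]
        cases h : List.filter (fun n => decide (n < t)) xs with
        | nil => simp [omax]
        | cons h' tl =>
          simp [omax]
          rw [List.foldl_assoc (op := max)]
      | some m =>
        by_cases hxm : m < x
        · dsimp only []
          rw [if_pos hxm, ih bg (some x)]
          simp [mge, mlt, hx, hlt]
          cases h : List.filter (fun n => decide (n < t)) xs with
          | nil => simp [omax]; omega
          | cons h' tl =>
            simp [omax, fmax]
            generalize List.foldl max h' tl = F
            omega
        · dsimp only []
          rw [if_neg hxm, ih bg (some m)]
          simp [mge, mlt, hx, hlt]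
          cases h : List.filter (fun n => decide (n < t)) xs with
          | nil => simp [omax]; omega
          | cons h' tl =>
            simp [omax, fmax]
            generalize List.foldl max h' tl = F
            omega

-- ===== VERDICT (by name: the statement is the Claim_ definition above) =====
theorem find_target_rule_spec : Claim_equal_find_target_rule := by
  intro t xs _
  unfold Spec_find_target_rule find_target_rule find_target_rule_alt
  rw [altStep_fold]
  simp only [omin, omax]
  cases hg : List.filter (fun n => decide (t ≤ n)) xs with
  | cons h tl =>
    simp [mge, hg, PySem.List.min?_id_cons]
  | nil =>
    have hmem : ∀ x ∈ xs, ¬ (t ≤ x) := by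
      intro x hxm
      have h2 := List.filter_eq_nil_iff.mp hg x hxm
      simpa using h2
    have hfe : List.filter (fun n => decide (n ≤ t)) xs = List.filter (fun n => decide (n < t)) xs := by
      apply List.filter_congr
      intro x hx
      have h3 := hmem x hx
      simp only [decide_eq_decide]
      omega
    simp only [mge, mlt, hg, ← hfe]
    cases hs : List.filter (fun n => decide (n ≤ t)) xs with
    | nil => simp
    | cons h tl => simp [PySem.List.max?_id_cons]
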